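-- pv_equiv track=rewrite | github.com/Starry331/Daydream-Whisper | src/dwhisper/postprocess.py | _split_for_fake_stream
-- ===== SOURCE A (Python) =====
-- def _split_for_fake_stream(text: str) -> list[str]:
--     """Break a full response into chunks so tests can observe multiple deltas."""
--
--     if not text:
--         return []
--     chunks: list[str] = []
--     buffer = ""
--     for ch in text:
--         buffer += ch
--         if ch.isspace():
--             chunks.append(buffer)
--             buffer = ""
--     if buffer:
--         chunks.append(buffer)
--     return chunks
-- ===== SOURCE B (Python) =====
-- def _split_for_fake_stream(text: str) -> list[str]:
--     """Break a full response into chunks so tests can observe multiple deltas."""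
--     boundaries = [i + 1 for i, ch in enumerate(text) if ch.isspace()]
--     chunks: list[str] = []
--     prev = 0
--     for b in boundaries:
--         chunks.append(text[prev:b])
--         prev = b
--     if prev < len(text):
--         chunks.append(text[prev:])
--     return chunks
-- ===== Notes on version B (the rewrite author's own statement) =====
-- stated objective: alternative
-- what changed: Replaces character-by-character buffer accumulation with a two-phase approach: first collect all whitespace boundary indices, then emit chunks by slicing between consecutive boundaries.
import Mathlib
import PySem

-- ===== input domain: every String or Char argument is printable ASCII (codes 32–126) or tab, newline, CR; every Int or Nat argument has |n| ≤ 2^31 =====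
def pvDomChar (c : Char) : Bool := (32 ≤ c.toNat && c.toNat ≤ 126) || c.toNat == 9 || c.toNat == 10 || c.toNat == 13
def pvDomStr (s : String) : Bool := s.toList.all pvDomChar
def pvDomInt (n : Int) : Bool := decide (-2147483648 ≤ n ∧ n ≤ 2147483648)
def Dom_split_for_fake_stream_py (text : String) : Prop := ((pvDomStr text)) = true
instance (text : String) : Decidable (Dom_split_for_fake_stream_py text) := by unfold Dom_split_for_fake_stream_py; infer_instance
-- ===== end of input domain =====

-- B replaces A's character-by-character buffer accumulation with a two-phase plan:
-- collect whitespace boundary indices first, then slice between consecutive boundaries (alternative decomposition, same cost).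
-- Strings are handled on the List Char side (PySem.Chars), exact on the stated ASCII domain.

-- ===== PORT A =====
-- literal transliteration: empty guard, foldl over the characters carrying (chunks, buffer),
-- then flush the non-empty trailing buffer.
def split_for_fake_stream_py (text : String) : List String :=
  let cs := text.toList
  if cs = [] then []
  else
    let st := cs.foldl
      (fun (st : List (List Char) × List Char) ch =>
        let buffer := st.2 ++ [ch]
        if PySem.Chars.isspace ch then (st.1 ++ [buffer], []) else (st.1, buffer))
      ([], [])
    let chunks := if st.2 ≠ [] then st.1 ++ [st.2] else st.1
    chunks.map String.ofList

-- ===== PORT B =====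
-- literal transliteration of Source B: boundary indices via enumerate+filter, then a cursor fold
-- emitting slices, then the trailing remainder slice.
def split_for_fake_stream_py_alt (text : String) : List String :=
  let cs := text.toList
  let boundaries := (PySem.List.enumerate cs).filterMap
    (fun p => if PySem.Chars.isspace p.2 then some (p.1 + 1) else none)
  let st := boundaries.foldl
    (fun (st : List (List Char) × Int) b =>
      (st.1 ++ [PySem.List.slice cs (some st.2) (some b)], b))
    ([], 0)
  let chunks := if st.2 < (cs.length : Int) then st.1 ++ [PySem.List.slice cs (some st.2) none] else st.1
  chunks.map String.ofList

-- ===== PRECONDITION & SPEC =====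
def Spec_split_for_fake_stream_py (text : String) (out : List String) : Prop := out = split_for_fake_stream_py_alt text
instance (text : String) (out : List String) : Decidable (Spec_split_for_fake_stream_py text out) := by unfold Spec_split_for_fake_stream_py; infer_instance

-- ===== CLAIM (what is proved, stated in full; the proofs are below) =====
def Claim_equal_split_for_fake_stream_py : Prop := ∀ (text : String), Dom_split_for_fake_stream_py text → Spec_split_for_fake_stream_py text (split_for_fake_stream_py text)

-- ===== LEMMAS AND PROOFS =====

-- reference recursive splitter: chunks of `cs` with pending buffer `buf`
def pvGob : List Char → List Char → List (List Char)
  | buf, [] => if buf = [] then [] else [buf]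
  | buf, c :: cs => if PySem.Chars.isspace c then (buf ++ [c]) :: pvGob [] cs else pvGob (buf ++ [c]) cs

theorem pvA_loop (cs : List Char) :
    ∀ (chunks : List (List Char)) (buf : List Char),
      (let st := cs.foldl
        (fun (st : List (List Char) × List Char) ch =>
          let buffer := st.2 ++ [ch]
          if PySem.Chars.isspace ch then (st.1 ++ [buffer], []) else (st.1, buffer))
        (chunks, buf);
       if st.2 ≠ [] then st.1 ++ [st.2] else st.1) = chunks ++ pvGob buf cs := by
  induction cs with
  | nil =>
      intro chunks buf
      simp only [List.foldl_nil, pvGob]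
      by_cases h : buf = [] <;> simp [h]
  | cons c cs ih =>
      intro chunks buf
      simp only [List.foldl_cons, pvGob]
      by_cases h : PySem.Chars.isspace c <;>
        simp only [h, if_true] <;>
        simp [ih]

theorem pvTake_len_succ (c : Char) (r : List Char) : ∀ (buf : List Char),
    (buf ++ c :: r).take (buf.length + 1) = buf ++ [c] := by
  intro buf; induction buf with
  | nil => simp
  | cons x xs ih => simp [List.take_succ_cons, ih]

theorem pvB_loop (F : List Char) :
    ∀ (cs buf : List Char) (prev : Nat) (chunks : List (List Char)),
      F.drop prev = buf ++ cs →
      (let st := ((PySem.List.enumerate cs ((prev + buf.length : Nat) : Int)).filterMap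
          (fun p => if PySem.Chars.isspace p.2 then some (p.1 + 1) else none)).foldl
        (fun (st : List (List Char) × Int) b =>
          (st.1 ++ [PySem.List.slice F (some st.2) (some b)], b))
        (chunks, (prev : Int));
       if st.2 < (F.length : Int) then st.1 ++ [PySem.List.slice F (some st.2) none] else st.1)
        = chunks ++ pvGob buf cs := by
  intro cs
  induction cs with
  | nil =>
      intro buf prev chunks hdrop
      simp only [PySem.List.enumerate_nil, List.filterMap_nil, List.foldl_nil, pvGob]
      rw [PySem.List.slice_from_natCast]
      simp only [List.append_nil] at hdrop
      by_cases h : buf = []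
      · subst h
        have hlen : F.length ≤ prev := by
          have := congrArg List.length hdrop; simpa using List.drop_eq_nil_iff.mp hdrop
        have : ¬ ((prev : Int) < (F.length : Int)) := by exact_mod_cast not_lt.mpr hlen
        simp [this]
      · have hne : F.drop prev ≠ [] := by rw [hdrop]; exact h
        have hlen : prev < F.length := by
          by_contra hc
          exact hne (List.drop_eq_nil_iff.mpr (le_of_not_gt hc))
        have : ((prev : Int) < (F.length : Int)) := by exact_mod_cast hlen
        simp [this, hdrop, h]
  | cons c cs ih =>
      intro buf prev chunks hdrop
      have hdrop' : F.drop (prev + (buf.length + 1)) = cs := by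
        rw [← List.drop_drop, hdrop]
        have : (buf ++ c :: cs).drop (buf.length + 1) = cs := by
          induction buf with
          | nil => simp
          | cons x xs ihb => simp
        simp [this]
      rw [PySem.List.enumerate_cons]
      by_cases h : PySem.Chars.isspace c
      · have hslice : PySem.List.slice F (some (prev : Int)) (some ((prev + (buf.length + 1) : Nat) : Int))
            = buf ++ [c] := by
          have h2 : ((prev + (buf.length + 1) : Nat) : Int) = ((prev : Nat) : Int) + ((buf.length + 1 : Nat) : Int) := by
            push_cast; ring
          rw [h2, PySem.List.slice_natCast_add, hdrop, pvTake_len_succ]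
        have hrec := ih [] (prev + (buf.length + 1)) (chunks ++ [buf ++ [c]]) (by simp [hdrop'])
        simp only [List.length_nil, Nat.add_zero] at hrec
        simp only [pvGob, h, if_true]
        simp [h]
        push_cast at hslice hrec ⊢
        ring_nf at hslice hrec ⊢
        rw [hslice]
        simpa using hrec
      · have hrec := ih (buf ++ [c]) prev chunks (by simp [hdrop])
        simp only [pvGob, h]
        simp [h] at hrec ⊢
        convert hrec using 2

-- ===== VERDICT (by name: the statement is the Claim_ definition above) =====
theorem split_for_fake_stream_py_spec : Claim_equal_split_for_fake_stream_py := by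
  intro text _
  unfold Spec_split_for_fake_stream_py split_for_fake_stream_py split_for_fake_stream_py_alt
  by_cases h : text.toList = []
  · simp [h, PySem.List.enumerate_nil]
  · simp only [h, if_false]
    have hA := pvA_loop text.toList [] []
    have hB := pvB_loop text.toList text.toList [] 0 [] (by simp)
    simp only [List.length_nil, Nat.add_zero, Nat.cast_zero, List.nil_append] at hA hB
    rw [hA, hB]
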